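-- pv_equiv track=rewrite | github.com/AleksKolychev/deep_into_python | dz_seminar_3/task_3.py | fill_backpack
-- ===== SOURCE A (Python) =====
-- def fill_backpack(items, max_weight):
--     n = len(items)
--     item_set = [[set() for _ in range(max_weight + 1)] for _ in range(n + 1)]
--     item_set[0][0] = {()}
--
--     for i in range(1, n + 1):
--         item_name, item_weight = items[i - 1]
--         for w in range(max_weight + 1):
--             if item_weight > w:
--                 item_set[i][w] = item_set[i - 1][w]
--             else:
--                 for prev_set in item_set[i - 1][w]:
--                     item_set[i][w].add(prev_set)
--                 for prev_set in item_set[i - 1][w - item_weight]: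
--                     new_set = prev_set + (item_name,)
--                     item_set[i][w].add(new_set)
--
--     return item_set[n][max_weight]
-- ===== SOURCE B (Python) =====
-- def fill_backpack(items, max_weight):
--     def rec(i, remaining):
--         # subsets of items[:i] whose weights sum to remaining, as name-tuples
--         if i == 0:
--             return {()} if remaining == 0 else set()
--         name, weight = items[i - 1]
--         result = set(rec(i - 1, remaining))
--         if weight <= remaining:
--             for prev in rec(i - 1, remaining - weight):
--                 result.add(prev + (name,))
--         return result
--     return rec(len(items), max_weight)
-- ===== Notes on version B (the rewrite author's own statement) =====
-- stated objective: alternative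
-- what changed: Replaces the bottom-up (n+1)x(max_weight+1) DP table of sets with a top-down take/skip recursion rec(i, remaining) over item prefixes that computes only the reachable (prefix, remaining) pairs and no table.
-- outside the precondition, e.g. on fill_backpack([('pen', 1)], -1): A raises IndexError, B returns set(); on fill_backpack([('a', -1)], 2): A raises IndexError, B returns set()
-- crash fix: On inputs with max_weight < 0 or any negative item weight A raises IndexError (indexing past the DP row); B returns the set of fitting subsets, empty for a negative max_weight. — e.g. on fill_backpack([("pen", 1)], -1): A raises IndexError, B returns []
import Mathlib
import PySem

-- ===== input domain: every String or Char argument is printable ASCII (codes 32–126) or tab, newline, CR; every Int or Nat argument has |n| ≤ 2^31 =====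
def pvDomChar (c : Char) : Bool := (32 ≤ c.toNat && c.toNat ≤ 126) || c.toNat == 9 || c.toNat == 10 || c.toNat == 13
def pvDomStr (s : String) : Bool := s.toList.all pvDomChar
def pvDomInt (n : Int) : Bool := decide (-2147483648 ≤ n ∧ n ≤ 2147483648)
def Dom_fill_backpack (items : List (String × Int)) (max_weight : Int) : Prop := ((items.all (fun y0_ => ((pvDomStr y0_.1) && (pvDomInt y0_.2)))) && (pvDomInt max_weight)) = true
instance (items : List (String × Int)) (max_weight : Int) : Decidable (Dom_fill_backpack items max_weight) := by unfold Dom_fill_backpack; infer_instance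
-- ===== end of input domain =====

-- B replaces A's bottom-up (n+1)×(max_weight+1) DP table by a top-down two-branch recursion
-- (take/skip the last item) computing only the needed (prefix, remaining) pairs; objective: alternative.

-- ===== PORT A =====
-- row 0: max_weight+1 empty sets, with item_set[0][0] = {()}
def fbRow0 (M : Nat) : List (PySem.Set (List String)) :=
  (PySem.Set.add PySem.Set.empty ([] : List String)) :: List.replicate M PySem.Set.empty

-- one iteration of 'for i in range(1, n+1)': builds row i from row i-1.
-- prev[w - item_weight] is read with pyGet?; its none case (Python's IndexError, reachable
-- only for a negative item weight) is excluded by Pre_fill_backpack, [] stands in for it.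
def fbStep (M : Nat) (prev : List (PySem.Set (List String))) (it : String × Int) :
    List (PySem.Set (List String)) :=
  (List.range (M + 1)).map (fun (w : Nat) =>
    if it.2 > (w : Int) then prev.getD w []
    else
      let base := (prev.getD w []).foldl PySem.Set.add PySem.Set.empty
      ((PySem.List.pyGet? prev ((w : Int) - it.2)).getD []).foldl
        (fun s t => PySem.Set.add s (t ++ [it.1])) base)

-- range(max_weight + 1): Pre_ gives 0 ≤ max_weight (Python raises IndexError otherwise)
def fill_backpack (items : List (String × Int)) (max_weight : Int) : List (List String) :=
  let M := max_weight.toNat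
  (items.foldl (fbStep M) (fbRow0 M)).getD M []

-- ===== PORT B =====
-- rec(i, remaining) of Source B: recursion on i over items[:i] = structural recursion on items.reverse
def fbRec (rev : List (String × Int)) (r : Int) : PySem.Set (List String) :=
  match rev with
  | [] => if r = 0 then [([] : List String)] else PySem.Set.empty
  | (name, wt) :: rest =>
    let res := fbRec rest r
    if wt ≤ r then
      (fbRec rest (r - wt)).foldl (fun s t => PySem.Set.add s (t ++ [name])) res
    else res

def fill_backpack_alt (items : List (String × Int)) (max_weight : Int) : List (List String) :=
  fbRec items.reverse max_weight

-- ===== PRECONDITION & SPEC =====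
-- A raises IndexError when max_weight < 0 (row 0 has no cell 0) or when some item weight is
-- negative (it reads prev[w - weight] past the row end); Pre_ excludes exactly those inputs.
def Pre_fill_backpack (items : List (String × Int)) (max_weight : Int) : Prop :=
  0 ≤ max_weight ∧ ∀ p ∈ items, 0 ≤ p.2
instance (items : List (String × Int)) (max_weight : Int) : Decidable (Pre_fill_backpack items max_weight) := by unfold Pre_fill_backpack; infer_instance

def pvWitness_fill_backpack : (List (String × Int)) × Int := ([("pen", 1), ("book", 2), ("cup", 2)], 3)

-- On inputs with max_weight < 0 or a negative item weight A raises IndexError; B returns the set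
-- of fitting subsets, which is empty for a negative max_weight (theorem fill_backpack_raises below).
def Raises_fill_backpack (items : List (String × Int)) (max_weight : Int) : Prop :=
  max_weight < 0 ∨ ∃ p ∈ items, p.2 < 0
instance (items : List (String × Int)) (max_weight : Int) : Decidable (Raises_fill_backpack items max_weight) := by unfold Raises_fill_backpack; infer_instance
def pvRaiseWitness_fill_backpack : (List (String × Int)) × Int := ([("pen", 1)], -1)
def pvRaiseWitnessOut_fill_backpack : List (List String) := []

def Spec_fill_backpack (items : List (String × Int)) (max_weight : Int) (out : List (List String)) : Prop := out = fill_backpack_alt items max_weight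
instance (items : List (String × Int)) (max_weight : Int) (out : List (List String)) : Decidable (Spec_fill_backpack items max_weight out) := by unfold Spec_fill_backpack; infer_instance

-- ===== CLAIM (what is proved, stated in full; the proofs are below) =====
def Claim_equal_fill_backpack : Prop := ∀ (items : List (String × Int)) (max_weight : Int), Dom_fill_backpack items max_weight → Pre_fill_backpack items max_weight → Spec_fill_backpack items max_weight (fill_backpack items max_weight)

def Claim_raises_fill_backpack : Prop := (∀ (items : List (String × Int)) (max_weight : Int), Dom_fill_backpack items max_weight → Raises_fill_backpack items max_weight → ¬ Pre_fill_backpack items max_weight) ∧ (Dom_fill_backpack (pvRaiseWitness_fill_backpack.1) (pvRaiseWitness_fill_backpack.2) ∧ Raises_fill_backpack (pvRaiseWitness_fill_backpack.1) (pvRaiseWitness_fill_backpack.2) ∧ fill_backpack_alt (pvRaiseWitness_fill_backpack.1) (pvRaiseWitness_fill_backpack.2) = pvRaiseWitnessOut_fill_backpack)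

-- ===== LEMMAS AND PROOFS =====

lemma nodup_fbRec (rev : List (String × Int)) (r : Int) : (fbRec rev r).Nodup := by
  induction rev generalizing r with
  | nil => simp [fbRec]; split <;> simp
  | cons p rest ih =>
    obtain ⟨name, wt⟩ := p
    simp only [fbRec]
    split
    · rw [← PySem.Set.update_map_eq_foldl_add]
      exact PySem.Set.nodup_update _ _ (ih r)
    · exact ih r

lemma length_fbRow0 (M : Nat) : (fbRow0 M).length = M + 1 := by
  simp [fbRow0, PySem.Set.add]

lemma length_fbStep (M : Nat) (prev : List (PySem.Set (List String))) (it : String × Int) :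
    (fbStep M prev it).length = M + 1 := by
  simp [fbStep]

lemma getD_fbRow0 (M w : Nat) (hw : w ≤ M) :
    (fbRow0 M).getD w [] = fbRec [] (w : Int) := by
  cases w with
  | zero => simp [fbRow0, fbRec, PySem.Set.add, PySem.Set.empty]
  | succ k =>
    have h1 : ¬ ((k : Int) + 1 = 0) := by omega
    have h2 : k < M := by omega
    simp [fbRow0, fbRec, PySem.Set.add, PySem.Set.empty, List.getD, h1, h2]

lemma getD_fbStep (M : Nat) (prev : List (PySem.Set (List String))) (name : String) (wt : Int)
    (hwt : 0 ≤ wt) (hlen : prev.length = M + 1) (acc : List (String × Int))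
    (hprev : ∀ w : Nat, w ≤ M → prev.getD w [] = fbRec acc (w : Int)) :
    ∀ w : Nat, w ≤ M → (fbStep M prev (name, wt)).getD w [] = fbRec ((name, wt) :: acc) (w : Int) := by
  intro w hw
  have hwlt : w < M + 1 := by omega
  have hbody : (fbStep M prev (name, wt)).getD w [] =
      (if wt > (w : Int) then prev.getD w []
       else
         let base := (prev.getD w []).foldl PySem.Set.add PySem.Set.empty
         ((PySem.List.pyGet? prev ((w : Int) - wt)).getD []).foldl
           (fun s t => PySem.Set.add s (t ++ [name])) base) := by
    simp [fbStep, List.getD, hwlt]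
  rw [hbody]
  by_cases hc : wt ≤ (w : Int)
  · have hnot : ¬ wt > (w : Int) := by omega
    simp only [hnot, if_neg, not_false_iff]
    -- the index w - wt is a valid Nat index
    have hj : ((w : Int) - wt) = ((w - wt.toNat : Nat) : Int) := by omega
    have hjle : w - wt.toNat ≤ M := by omega
    have hjlt : w - wt.toNat < prev.length := by omega
    rw [hj, PySem.List.pyGet?_natCast]
    have : prev[(w - wt.toNat : Nat)]? = some (prev.getD (w - wt.toNat) []) := by
      rw [List.getD_eq_getElem?_getD, List.getElem?_eq_getElem hjlt]
      simp
    rw [this]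
    simp only [Option.getD_some]
    -- base = fbRec acc w since it is Nodup
    have hbase : (prev.getD w []).foldl PySem.Set.add PySem.Set.empty = fbRec acc (w : Int) := by
      rw [hprev w hw]
      rw [show (PySem.Set.empty : PySem.Set (List String)) = [] from rfl, ← PySem.Set.ofList_eq_foldl]
      exact PySem.Set.ofList_eq_self_of_nodup _ (nodup_fbRec acc _)
    rw [hbase, hprev _ hjle, ← hj]
    simp only [fbRec, hc, if_pos]
  · have hgt : wt > (w : Int) := by omega
    simp only [hgt, if_pos]
    rw [hprev w hw]
    simp only [fbRec, hc, if_neg, not_false_iff]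

lemma foldl_fbStep_inv (M : Nat) :
    ∀ (l : List (String × Int)) (acc : List (String × Int)) (row : List (PySem.Set (List String))),
      (∀ p ∈ l, 0 ≤ p.2) → row.length = M + 1 →
      (∀ w : Nat, w ≤ M → row.getD w [] = fbRec acc (w : Int)) →
      ∀ w : Nat, w ≤ M → (l.foldl (fbStep M) row).getD w [] = fbRec (l.reverse ++ acc) (w : Int) := by
  intro l
  induction l with
  | nil => intro acc row _ _ hrow w hw; simpa using hrow w hw
  | cons p rest ih =>
    intro acc row hpos hlen hrow w hw
    obtain ⟨name, wt⟩ := p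
    have hwt : 0 ≤ wt := hpos (name, wt) List.mem_cons_self
    have hstep := getD_fbStep M row name wt hwt hlen acc hrow
    have hlen' : (fbStep M row (name, wt)).length = M + 1 := length_fbStep M row _
    have := ih ((name, wt) :: acc) (fbStep M row (name, wt))
      (fun q hq => hpos q (List.mem_cons_of_mem _ hq)) hlen' hstep w hw
    simpa [List.append_assoc] using this

-- ===== VERDICT (by name: the statement is the Claim_ definition above) =====
theorem fill_backpack_spec : Claim_equal_fill_backpack := by
  intro items max_weight _hdom hpre
  obtain ⟨hW, hpos⟩ := hpre
  unfold Spec_fill_backpack fill_backpack fill_backpack_alt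
  have hM : ((max_weight.toNat : Nat) : Int) = max_weight := Int.toNat_of_nonneg hW
  have := foldl_fbStep_inv max_weight.toNat items [] (fbRow0 max_weight.toNat) hpos
    (length_fbRow0 _) (fun w hw => getD_fbRow0 _ w hw) max_weight.toNat (le_refl _)
  simpa [hM] using this

theorem fill_backpack_raises : Claim_raises_fill_backpack := by
  unfold Claim_raises_fill_backpack
  constructor
  · intro items max_weight _ hr hpre
    obtain ⟨hW, hpos⟩ := hpre
    rcases hr with h | ⟨p, hp, hneg⟩
    · omega
    · have := hpos p hp; omega
  · exact ⟨by decide, by decide, by decide⟩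

-- self-check: the raise witness lies in Dom_ and B's port really returns the stated literal there
theorem pvRaiseWitness_ok :
    Dom_fill_backpack pvRaiseWitness_fill_backpack.1 pvRaiseWitness_fill_backpack.2 ∧
    fill_backpack_alt pvRaiseWitness_fill_backpack.1 pvRaiseWitness_fill_backpack.2 = pvRaiseWitnessOut_fill_backpack := by
  have h := fill_backpack_raises
  unfold Claim_raises_fill_backpack at h
  exact ⟨h.2.1, h.2.2.2⟩
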